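-- pv_equiv track=rewrite | github.com/Windowline/customized-xy-cut | left_firsrt_xy_cut.py | _split_by_first_zero_gap
-- ===== SOURCE A (Python) =====
-- def _split_by_first_zero_gap(proj, min_gap=1):
--     ret_intervals = []
--     curr_interval = [None, None]
--
--     for i in range(len(proj)):
--         if proj[i] == 0 and curr_interval[0] is None:
--             curr_interval[0] = i
--         elif proj[i] >= 1 and curr_interval[0] is not None:
--             curr_interval[1] = i - 1
--
--         if all(v is not None for v in curr_interval):
--             ret_intervals.append([curr_interval[0], curr_interval[1]])
--             curr_interval[0] = None
--             curr_interval[1] = None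
--
--     ret_intervals = [x for x in ret_intervals if (x[1] - x[0] + 1) >= min_gap]
--
--     if len(ret_intervals) >= 2:  # ret_intervals[1:-1]
--         return ret_intervals[1]
--     else:
--         return [None, None]
-- ===== SOURCE B (Python) =====
-- def _split_by_first_zero_gap(proj, min_gap=1):
--     # Walls are indices with proj[w] >= 1; for each wall, the first zero in the
--     # segment since the previous wall opens the interval that the wall closes.
--     intervals = []
--     start = 0
--     for w, v in enumerate(proj):
--         if v >= 1:
--             j = next((j for j in range(start, w) if proj[j] == 0), None)
--             if j is not None:
--                 intervals.append([j, w - 1])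
--             start = w + 1
--     intervals = [x for x in intervals if x[1] - x[0] + 1 >= min_gap]
--     return intervals[1] if len(intervals) >= 2 else [None, None]
-- ===== Notes on version B (the rewrite author's own statement) =====
-- stated objective: alternative
-- what changed: Replaces A's stateful open/close interval machine (mutable curr_interval with None sentinels and an all() check updated at every index) by a wall-driven decomposition: for each index with proj[w] >= 1, scan the segment since the previous wall for its first zero and emit [first_zero, w-1] directly, then filter and pick the second interval.
import Mathlib
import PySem

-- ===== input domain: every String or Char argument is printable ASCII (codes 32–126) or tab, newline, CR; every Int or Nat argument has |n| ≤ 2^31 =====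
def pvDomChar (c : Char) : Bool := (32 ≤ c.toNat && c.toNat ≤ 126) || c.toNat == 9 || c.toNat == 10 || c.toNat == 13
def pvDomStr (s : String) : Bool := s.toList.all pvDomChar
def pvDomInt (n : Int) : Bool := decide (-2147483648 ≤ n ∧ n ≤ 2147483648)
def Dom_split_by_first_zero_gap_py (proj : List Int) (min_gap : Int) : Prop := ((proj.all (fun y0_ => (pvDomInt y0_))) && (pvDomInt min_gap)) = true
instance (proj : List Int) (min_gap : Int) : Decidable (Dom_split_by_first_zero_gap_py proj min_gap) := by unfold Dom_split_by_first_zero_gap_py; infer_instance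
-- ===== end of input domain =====

-- B replaces A's stateful open/close interval machine by a wall-driven segment scan (objective: alternative decomposition, same cost).

-- ===== PORT A =====
-- one loop iteration of A: update curr_interval, then append-and-reset when both ends are set
def stepA (proj : List Int) (st : List (Option Int × Option Int) × (Option Int × Option Int)) (i : Int) :
    List (Option Int × Option Int) × (Option Int × Option Int) :=
  let curr :=
    if PySem.List.pyGetD proj i 0 == 0 && st.2.1.isNone then (some i, st.2.2)
    else if decide (PySem.List.pyGetD proj i 0 ≥ 1) && st.2.1.isSome then (st.2.1, some (i - 1))
    else st.2
  if curr.1.isSome && curr.2.isSome then (st.1 ++ [curr], (none, none)) else (st.1, curr)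

def split_by_first_zero_gap_py (proj : List Int) (min_gap : Int) : List (Option Int) :=
  -- for i in range(len(proj)): every index is in range, so proj[i] is pyGetD proj i 0 (exact)
  let st := (PySem.List.pyRange 0 (proj.length : Int) 1).foldl (stepA proj) ([], (none, none))
  -- appended intervals always have both components set, so .getD 0 reads the int Python subtracts (exact)
  let ret := st.1.filter (fun x => decide (x.2.getD 0 - x.1.getD 0 + 1 ≥ min_gap))
  if ret.length ≥ 2 then
    let x := ret.getD 1 (none, none)
    [x.1, x.2]
  else [none, none]

-- ===== PORT B =====
-- one loop iteration of B: at a wall, emit [first zero of the segment, w-1] and start a new segment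
def stepB (proj : List Int) (st : List (Int × Int) × Int) (wv : Int × Int) : List (Int × Int) × Int :=
  if wv.2 ≥ 1 then
    match (PySem.List.pyRange st.2 wv.1 1).find? (fun j => PySem.List.pyGetD proj j 0 == 0) with
    | some j => (st.1 ++ [(j, wv.1 - 1)], wv.1 + 1)
    | none => (st.1, wv.1 + 1)
  else st

def split_by_first_zero_gap_py_alt (proj : List Int) (min_gap : Int) : List (Option Int) :=
  let st := (PySem.List.enumerate proj).foldl (stepB proj) ([], 0)
  let ivs := st.1.filter (fun x => decide (x.2 - x.1 + 1 ≥ min_gap))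
  match ivs with
  | _ :: x :: _ => [some x.1, some x.2]
  | _ => [none, none]

-- ===== PRECONDITION & SPEC =====
def Spec_split_by_first_zero_gap_py (proj : List Int) (min_gap : Int) (out : List (Option Int)) : Prop := out = split_by_first_zero_gap_py_alt proj min_gap
instance (proj : List Int) (min_gap : Int) (out : List (Option Int)) : Decidable (Spec_split_by_first_zero_gap_py proj min_gap out) := by unfold Spec_split_by_first_zero_gap_py; infer_instance

-- ===== CLAIM (what is proved, stated in full; the proofs are below) =====
def Claim_equal_split_by_first_zero_gap_py : Prop := ∀ (proj : List Int) (min_gap : Int), Dom_split_by_first_zero_gap_py proj min_gap → Spec_split_by_first_zero_gap_py proj min_gap (split_by_first_zero_gap_py proj min_gap)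

-- ===== LEMMAS AND PROOFS =====

-- the embedding of B's closed intervals into A's option pairs
def embed (q : Int × Int) : Option Int × Option Int := (some q.1, some q.2)

-- the zero-search B performs on the current segment [start, n)
def firstZero (proj : List Int) (start n : Int) : Option Int :=
  (PySem.List.pyRange start n 1).find? (fun j => PySem.List.pyGetD proj j 0 == 0)

-- main invariant: after processing indices [0, n), A's state is B's state under `embed`,
-- A's curr_interval is (first zero of B's current segment, none), and B's segment start is in [0, n]
theorem loop_inv (proj : List Int) (n : Nat) :
    ∃ (ivs : List (Int × Int)) (start : Int),
      (PySem.List.pyRange 0 (n : Int) 1).foldl (stepA proj) ([], (none, none))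
        = (ivs.map embed, (firstZero proj start n, none))
      ∧ (PySem.List.pyRange 0 (n : Int) 1).foldl
          (fun st j => stepB proj st (j, PySem.List.pyGetD proj j 0)) ([], 0) = (ivs, start)
      ∧ 0 ≤ start ∧ start ≤ (n : Int) := by
  induction n with
  | zero =>
    refine ⟨[], 0, ?_, ?_, le_refl 0, le_refl 0⟩ <;>
      simp [PySem.List.pyRange_one_eq_nil (by omega : (0:Int) ≤ 0), firstZero]
  | succ n ih =>
    obtain ⟨ivs, start, hA, hB, h0, hn⟩ := ih
    have hr : PySem.List.pyRange 0 ((n:Int) + 1) 1 = PySem.List.pyRange 0 (n:Int) 1 ++ [(n:Int)] :=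
      PySem.List.pyRange_one_succ_right (by omega)
    have hrs : PySem.List.pyRange start ((n:Int) + 1) 1
        = PySem.List.pyRange start (n:Int) 1 ++ [(n:Int)] :=
      PySem.List.pyRange_one_succ_right hn
    push_cast
    rw [hr, List.foldl_append, List.foldl_append, hA, hB]
    simp only [List.foldl_cons, List.foldl_nil]
    by_cases hv0 : (proj[n]?).getD 0 = (0:Int)
    · -- proj[n] == 0 : A records the first zero; B's segment search now finds it
      cases ho : firstZero proj start (n:Int) with
      | none =>
        refine ⟨ivs, start, ?_, ?_, h0, by omega⟩
        · simp only [firstZero] at ho ⊢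
          rw [hrs, List.find?_append, ho]
          simp [stepA, hv0]
        · simp [stepB, hv0]
      | some j =>
        refine ⟨ivs, start, ?_, ?_, h0, by omega⟩
        · simp only [firstZero] at ho ⊢
          rw [hrs, List.find?_append, ho]
          simp [stepA, hv0]
        · simp [stepB, hv0]
    · by_cases hv1 : (proj[n]?).getD 0 ≥ (1:Int)
      · -- proj[n] >= 1 : a wall; both close the segment, appending iff it contained a zero
        cases ho : firstZero proj start (n:Int) with
        | none =>
          refine ⟨ivs, (n:Int) + 1, ?_, ?_, by omega, by omega⟩
          · simp [stepA, hv0, hv1, firstZero,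
              PySem.List.pyRange_one_eq_nil (by omega : (n:Int) + 1 ≤ (n:Int) + 1)]
          · simp only [firstZero] at ho
            simp [stepB, hv1, ho]
        | some j =>
          refine ⟨ivs ++ [(j, (n:Int) - 1)], (n:Int) + 1, ?_, ?_, by omega, by omega⟩
          · simp [stepA, hv1, firstZero, embed,
              PySem.List.pyRange_one_eq_nil (by omega : (n:Int) + 1 ≤ (n:Int) + 1)]
          · simp only [firstZero] at ho
            simp [stepB, hv1, ho]
      · -- proj[n] < 0 : ignored by both
        refine ⟨ivs, start, ?_, ?_, h0, by omega⟩
        · simp only [firstZero]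
          rw [hrs, List.find?_append]
          simp [stepA, hv0, hv1]
        · simp [stepB, hv1]

-- ===== VERDICT (by name: the statement is the Claim_ definition above) =====
theorem split_by_first_zero_gap_py_spec : Claim_equal_split_by_first_zero_gap_py := by
  intro proj min_gap _
  unfold Spec_split_by_first_zero_gap_py split_by_first_zero_gap_py split_by_first_zero_gap_py_alt
  obtain ⟨ivs, start, hA, hB, -, -⟩ := loop_inv proj proj.length
  have hlen : PySem.List.len proj = (proj.length : Int) := by simp [PySem.List.len]
  rw [PySem.List.enumerate_eq_map_pyRange (d := 0), hlen, List.foldl_map, hB, hA]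
  have key : (ivs.map embed).filter (fun x => decide (x.2.getD 0 - x.1.getD 0 + 1 ≥ min_gap))
      = (ivs.filter (fun x => decide (x.2 - x.1 + 1 ≥ min_gap))).map embed := by
    simp [List.filter_map, Function.comp_def, embed]
    rfl
  simp only [key]
  cases hf : ivs.filter (fun x => decide (x.2 - x.1 + 1 ≥ min_gap)) with
  | nil => simp
  | cons x0 t =>
    cases t with
    | nil => simp [embed]
    | cons x1 t => simp [embed]
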